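-- pv_equiv track=rewrite | github.com/wyk18703232953/myResearch | codeComplex/data/filteredData/python/linear/python_linear_0589.py | solve
-- ===== SOURCE A (Python) =====
-- mod = 1000000007
--
-- def solve(n, q, s, queries):
--     arr = []
--     count = 0
--     for ch in s:
--         if ch == '1':
--             count += 1
--         arr.append(count)
--
--     ansarr = []
--     for x, y in queries:
--         if x == 1:
--             total1 = arr[y - 1]
--
--         else:
--             total1 = arr[y - 1] - arr[x - 2]
--         total0 = (y - x + 1 - total1)
--         length = y - x + 1
--         ans = pow(2, length, mod) % mod
--         ans = ((((ans % mod) - (pow(2, total0, mod) % mod)) % mod) + mod) % mod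
--         ansarr.append(ans)
--     return ansarr
-- ===== SOURCE B (Python) =====
-- mod = 1000000007
--
-- def solve(n, q, s, queries):
--     out = []
--     for x, y in queries:
--         ones = s[:y].count('1') - s[:x - 1].count('1')
--         length = y - x + 1
--         out.append((pow(2, length, mod) - pow(2, length - ones, mod)) % mod)
--     return out
-- ===== Notes on version B (the rewrite author's own statement) =====
-- stated objective: simpler
-- what changed: B drops A's precomputed prefix-count array and its two-branch index arithmetic entirely: each query computes its ones-count as the difference of two direct prefix-slice scans s[:y] and s[:x-1], with one normalized Python modulo instead of A's chain of redundant % operations; Pre_ excludes only the queries on which A raises IndexError.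
-- intended difference: On queries with y = 0 against a string containing '1', A's arr[y-1] lookup wraps around to the whole-string prefix count and A returns a value unrelated to the query's empty window (e.g. [500000004] at the witness), while B counts the empty prefix s[:0] and returns [0], the intended answer for an empty window. — e.g. on solve(1, 1, "1", [(1, 0)]): A returns [500000004], B returns [0]
import Mathlib
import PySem

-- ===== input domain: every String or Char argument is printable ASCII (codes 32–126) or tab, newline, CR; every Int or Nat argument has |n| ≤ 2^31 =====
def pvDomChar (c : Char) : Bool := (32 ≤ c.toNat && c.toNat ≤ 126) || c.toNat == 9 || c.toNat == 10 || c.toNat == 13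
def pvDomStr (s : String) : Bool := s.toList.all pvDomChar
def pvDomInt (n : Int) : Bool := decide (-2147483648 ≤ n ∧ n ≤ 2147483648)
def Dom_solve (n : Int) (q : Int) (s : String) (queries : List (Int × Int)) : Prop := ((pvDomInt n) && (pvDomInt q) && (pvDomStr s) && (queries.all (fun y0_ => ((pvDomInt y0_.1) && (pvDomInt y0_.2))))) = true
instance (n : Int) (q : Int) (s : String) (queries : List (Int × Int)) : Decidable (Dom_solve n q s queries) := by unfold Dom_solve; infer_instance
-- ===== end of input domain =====

-- B replaces A's precomputed prefix-count array and its two-branch index arithmetic by a direct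
-- per-query difference of two prefix-slice scans, with one normalized modulo (objective: simpler).

def pvMod : Int := 1000000007

-- extended Euclid (fuelled structural recursion; 128 steps cover any modulus < 2^64):
-- pvEgcd f a b = (g, u, v) with u*a + v*b = g = gcd(a, b)
def pvEgcd : Nat → Int → Int → Int × Int × Int
  | 0, a, _ => (a, 1, 0)
  | f + 1, a, b =>
    if b = 0 then (a, 1, 0)
    else
      let r := pvEgcd f b (PySem.Int.mod a b)
      (r.1, r.2.2, r.2.1 - PySem.Int.floordiv a b * r.2.2)

-- fuelled binary modular exponentiation (64 squarings cover every exponent < 2^64; the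
-- fuelled structural recursion keeps the ports kernel-evaluable, unlike PySem.Int.powMod's
-- unary recursion): pvPowMod2 e = 2^e mod 1000000007 in [0, m), exactly Python's pow value
def pvPowGo : Nat → Int → Nat → Int → Int
  | 0, _, _, acc => acc
  | f + 1, b, e, acc =>
    if e = 0 then acc
    else pvPowGo f (PySem.Int.mod (b * b) pvMod) (e / 2)
      (if e % 2 = 1 then PySem.Int.mod (acc * b) pvMod else acc)
def pvPowMod2 (e : Nat) : Int := pvPowGo 64 (PySem.Int.mod 2 pvMod) e (PySem.Int.mod 1 pvMod)

-- Python's three-argument pow(2, e, 1000000007), both programs' only use of pow: for e ≥ 0 it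
-- is modular exponentiation; for e < 0 Python returns the modular inverse of 2^|e| mod m,
-- normalized into [0, m) — computed here, as in CPython, by extended Euclid (exact: the
-- inverse in [0, m) is unique, and gcd(2^|e|, 1000000007) = 1 always).
def pvPow2 (e : Int) : Int :=
  if 0 ≤ e then pvPowMod2 e.toNat
  else PySem.Int.mod (pvEgcd 128 (pvPowMod2 e.natAbs) pvMod).2.1 pvMod

-- ===== PORT A =====
-- arr[i] lookups: Python raises IndexError out of range; pyGetD's default is reached
-- only outside Pre_solve.
def solve (n : Int) (q : Int) (s : String) (queries : List (Int × Int)) : List Int :=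
  let st := s.toList.foldl
    (fun (st : Int × List Int) ch =>
      let count := if ch = '1' then st.1 + 1 else st.1
      (count, st.2 ++ [count])) (0, ([] : List Int))
  let arr := st.2
  queries.foldl
    (fun ansarr xy =>
      let x := xy.1
      let y := xy.2
      let total1 :=
        if x = 1 then PySem.List.pyGetD arr (y - 1) 0
        else PySem.List.pyGetD arr (y - 1) 0 - PySem.List.pyGetD arr (x - 2) 0
      let total0 := y - x + 1 - total1
      let length := y - x + 1
      let ans := PySem.Int.mod (pvPow2 length) pvMod
      let ans := PySem.Int.mod (PySem.Int.mod (PySem.Int.mod ans pvMod -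
        PySem.Int.mod (pvPow2 total0) pvMod) pvMod + pvMod) pvMod
      ansarr ++ [ans]) []

-- ===== PORT B =====
def solve_alt (n : Int) (q : Int) (s : String) (queries : List (Int × Int)) : List Int :=
  queries.foldl (fun out xy =>
    let x := xy.1
    let y := xy.2
    let ones : Int := PySem.Str.count (PySem.Str.slice s none (some y)) "1" -
      PySem.Str.count (PySem.Str.slice s none (some (x - 1))) "1"
    let length := y - x + 1
    out ++ [PySem.Int.mod (pvPow2 length - pvPow2 (length - ones)) pvMod]) []

-- ===== PRECONDITION & SPEC =====
-- Pre_solve excludes exactly the queries on which A raises IndexError (arr[y-1] or arr[x-2]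
-- out of range).
def Pre_solve (n : Int) (q : Int) (s : String) (queries : List (Int × Int)) : Prop :=
  ∀ p ∈ queries,
    (1 - (s.toList.length : Int) ≤ p.2 ∧ p.2 ≤ (s.toList.length : Int)) ∧
    (p.1 = 1 ∨ (2 - (s.toList.length : Int) ≤ p.1 ∧ p.1 ≤ (s.toList.length : Int) + 1))
instance (n : Int) (q : Int) (s : String) (queries : List (Int × Int)) : Decidable (Pre_solve n q s queries) := by unfold Pre_solve; infer_instance

def pvWitness_solve : Int × Int × String × (List (Int × Int)) := (3, 2, "101", [(1, 2), (2, 3)])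

-- On a query with y = 0 against a string containing '1', A's arr[y-1] lookup wraps around to
-- the whole-string prefix count and A returns a value unrelated to the query's (empty) window,
-- while B counts the empty prefix s[:0] and returns the intended answer for an empty window.
def D_solve (n : Int) (q : Int) (s : String) (queries : List (Int × Int)) : Prop :=
  ∃ p ∈ queries, p.2 = 0 ∧ '1' ∈ s.toList
instance (n : Int) (q : Int) (s : String) (queries : List (Int × Int)) : Decidable (D_solve n q s queries) := by unfold D_solve; infer_instance

def Spec_solve (n : Int) (q : Int) (s : String) (queries : List (Int × Int)) (out : List Int) : Prop := ¬ D_solve n q s queries → out = solve_alt n q s queries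
instance (n : Int) (q : Int) (s : String) (queries : List (Int × Int)) (out : List Int) : Decidable (Spec_solve n q s queries out) := by unfold Spec_solve; infer_instance

def pvDiffWitness_solve : Int × Int × String × (List (Int × Int)) := (1, 1, "1", [(1, 0)])
def pvDiffWitnessOut_solve : (List Int) × (List Int) := ([500000004], [0])

-- ===== CLAIM (what is proved, stated in full; the proofs are below) =====
def Claim_unchanged_solve : Prop := ∀ (n : Int) (q : Int) (s : String) (queries : List (Int × Int)), Dom_solve n q s queries → Pre_solve n q s queries → Spec_solve n q s queries (solve n q s queries)
def Claim_changed_solve : Prop := Dom_solve (pvDiffWitness_solve.1) (pvDiffWitness_solve.2.1) (pvDiffWitness_solve.2.2.1) (pvDiffWitness_solve.2.2.2) ∧ Pre_solve (pvDiffWitness_solve.1) (pvDiffWitness_solve.2.1) (pvDiffWitness_solve.2.2.1) (pvDiffWitness_solve.2.2.2) ∧ D_solve (pvDiffWitness_solve.1) (pvDiffWitness_solve.2.1) (pvDiffWitness_solve.2.2.1) (pvDiffWitness_solve.2.2.2) ∧ solve (pvDiffWitness_solve.1) (pvDiffWitness_solve.2.1) (pvDiffWitness_solve.2.2.1) (pvDiffWitness_solve.2.2.2)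 = pvDiffWitnessOut_solve.1 ∧ solve_alt (pvDiffWitness_solve.1) (pvDiffWitness_solve.2.1) (pvDiffWitness_solve.2.2.1) (pvDiffWitness_solve.2.2.2) = pvDiffWitnessOut_solve.2 ∧ pvDiffWitnessOut_solve.1 ≠ pvDiffWitnessOut_solve.2

-- ===== LEMMAS AND PROOFS =====

-- the substring-count primitive on a single-character needle is the character count
theorem charsCountGo_one (fuel : Nat) : ∀ (l : List Char) (acc : Nat), l.length ≤ fuel →
    PySem.Chars.count.go ['1'] fuel l acc = acc + l.count '1' := by
  induction fuel with
  | zero =>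
    intro l acc h
    cases l with
    | nil => simp [PySem.Chars.count.go]
    | cons a t => simp at h
  | succ f ih =>
    intro l acc h
    cases l with
    | nil => simp [PySem.Chars.count.go]
    | cons a t =>
      simp only [List.length_cons] at h
      rw [PySem.Chars.count.go]
      by_cases ha : a = '1'
      · rw [if_pos (by simp [List.isPrefixOf, ha])]
        simp only [List.length_singleton, List.drop_succ_cons, List.drop_zero]
        rw [ih t (acc + 1) (by omega)]
        subst ha
        rw [List.count_cons_self]
        omega
      · rw [if_neg (by simp [List.isPrefixOf]; intro hc; exact ha hc.symm)]
        rw [ih t acc (by omega)]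
        rw [List.count_cons_of_ne ha]

theorem charsCount_one (l : List Char) : PySem.Chars.count l ['1'] = l.count '1' := by
  rw [PySem.Chars.count]
  simpa using charsCountGo_one l.length l 0 le_rfl

-- a prefix-count of B: s[:b] counted, expressed over the character list
theorem strPrefixCount (s : String) (b : Int) :
    (PySem.Str.count (PySem.Str.slice s none (some b)) "1" : Int)
    = ((PySem.List.slice s.toList none (some b)).count '1' : Int) := by
  rw [PySem.Str.count_eq, PySem.Str.toList_slice, PySem.Chars.slice_eq_listSlice]
  rw [show "1".toList = ['1'] from rfl, charsCount_one]

-- A's prefix-array loop builds the list of prefix '1'-counts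
theorem arr_spec (cs : List Char) : ∀ (c : Int) (acc : List Int),
    (cs.foldl (fun (st : Int × List Int) ch =>
      let count := if ch = '1' then st.1 + 1 else st.1
      (count, st.2 ++ [count])) (c, acc)).2
    = acc ++ (List.range cs.length).map (fun i => c + ((cs.take (i + 1)).count '1' : Int)) := by
  induction cs with
  | nil => intro c acc; simp
  | cons ch t ih =>
    intro c acc
    simp only [List.foldl_cons, List.length_cons, List.range_succ_eq_map]
    rw [ih]
    have e1 : (List.range t.length).map
          ((fun i => c + (((ch :: t).take (i + 1)).count '1' : Int)) ∘ (· + 1))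
        = (List.range t.length).map
          (fun i => (if ch = '1' then c + 1 else c) + ((t.take (i + 1)).count '1' : Int)) := by
      apply List.map_congr_left
      intro i _
      simp only [Function.comp_apply, List.take_succ_cons]
      by_cases h : ch = '1'
      · rw [if_pos h, h, List.count_cons_self]
        push_cast
        ring
      · rw [if_neg h, List.count_cons_of_ne h]
    have e0 : c + (((ch :: t).take (0 + 1)).count '1' : Int)
        = (if ch = '1' then c + 1 else c) := by
      by_cases h : ch = '1'
      · rw [if_pos h, h]
        simp
      · rw [if_neg h]
        simp only [List.take_succ_cons, List.take_zero]
        rw [show List.count '1' [ch] = 0 from List.count_eq_zero.mpr (by simp [Ne.symm h])]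
        simp
    simp only [List.map_cons, List.map_map, e1, e0]
    simp

-- Python-mod chain collapse: A's ((((a%m)%m)-(b%m))%m+m)%m equals B's normalized (a-b)%m
theorem mod_chain (a b : Int) :
    PySem.Int.mod (PySem.Int.mod (PySem.Int.mod (PySem.Int.mod a pvMod) pvMod -
      PySem.Int.mod b pvMod) pvMod + pvMod) pvMod
    = PySem.Int.mod (a - b) pvMod := by
  have hm : (0 : Int) < pvMod := by decide
  simp only [PySem.Int.mod_eq_emod_of_pos hm, Int.emod_emod_of_dvd _ dvd_rfl,
    Int.add_emod_right]
  exact (Int.sub_emod a b pvMod).symm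

theorem solve_spec_aux (n q : Int) (s : String) (queries : List (Int × Int))
    (hpre : Pre_solve n q s queries)
    (hnd : ∀ p ∈ queries, p.2 = 0 → '1' ∉ s.toList) :
    solve n q s queries = solve_alt n q s queries := by
  unfold solve solve_alt
  rw [PySem.List.foldl_append_singleton_eq_map, PySem.List.foldl_append_singleton_eq_map]
  rw [List.nil_append, List.nil_append]
  apply List.map_congr_left
  intro p hp
  obtain ⟨hqy, hqx⟩ := hpre p hp
  have hnd' := hnd p hp
  obtain ⟨x, y⟩ := p
  replace hqy : 1 - (s.toList.length : Int) ≤ y ∧ y ≤ (s.toList.length : Int) := hqy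
  replace hqx : x = 1 ∨ (2 - (s.toList.length : Int) ≤ x ∧ x ≤ (s.toList.length : Int) + 1) := hqx
  replace hnd' : y = 0 → '1' ∉ s.toList := hnd'
  simp only
  set cs := s.toList with hcs
  have harr : (cs.foldl (fun (st : Int × List Int) ch =>
      let count := if ch = '1' then st.1 + 1 else st.1
      (count, st.2 ++ [count])) ((0 : Int), ([] : List Int))).2
      = (List.range cs.length).map (fun i => ((cs.take (i + 1)).count '1' : Int)) := by
    rw [arr_spec]; simp
  simp only [harr]
  -- lookups into the prefix array, nonnegative and wrapped negative index
  have hget : ∀ (k : Nat), k < cs.length →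
      PySem.List.pyGetD ((List.range cs.length).map
        (fun i => ((cs.take (i + 1)).count '1' : Int))) (k : Int) 0
      = ((cs.take (k + 1)).count '1' : Int) := by
    intro k hk
    rw [PySem.List.pyGetD_of_nonneg _ _ (by positivity)]
    simp [hk]
  have hgetneg : ∀ (k : Nat), 0 < k → k ≤ cs.length →
      PySem.List.pyGetD ((List.range cs.length).map
        (fun i => ((cs.take (i + 1)).count '1' : Int))) (-(k : Int)) 0
      = ((cs.take (cs.length - k + 1)).count '1' : Int) := by
    intro k hk hkl
    have hlen' : ((List.range cs.length).map
        (fun i => ((cs.take (i + 1)).count '1' : Int))).length = cs.length := by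
      simp
    rw [PySem.List.pyGetD]
    rw [show (-(k : Int)) = -((((List.range cs.length).map
        (fun i => ((cs.take (i + 1)).count '1' : Int))).length : Int) - ((cs.length - k : Nat) : Int))
      from by rw [hlen']; have := Nat.cast_sub hkl (R := Int); omega]
    rw [show -((((List.range cs.length).map
        (fun i => ((cs.take (i + 1)).count '1' : Int))).length : Int) - ((cs.length - k : Nat) : Int))
      = -((k : Int)) from by rw [hlen']; have := Nat.cast_sub hkl (R := Int); omega]
    rw [PySem.List.pyGet?_neg_natCast _ k hk (by rw [hlen']; exact hkl)]
    rw [hlen']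
    have hlt : cs.length - k < cs.length := by omega
    simp [hlt]
  -- the prefixes both sides read: A reads take Ya through arr, B slices take Yb; equal counts
  obtain ⟨Ya, Yb, hPY, hSY, hYcnt⟩ :
      ∃ Ya Yb : Nat,
        PySem.List.pyGetD ((List.range cs.length).map
          (fun i => ((cs.take (i + 1)).count '1' : Int))) (y - 1) 0
          = ((cs.take Ya).count '1' : Int) ∧
        PySem.List.slice cs none (some y) = cs.take Yb ∧
        (cs.take Ya).count '1' = (cs.take Yb).count '1' := by
    by_cases hy0 : y = 0
    · have hone : '1' ∉ cs := by rw [hcs]; exact hnd' hy0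
      have hL1 : 1 ≤ cs.length := by omega
      refine ⟨cs.length, 0, ?_, ?_, ?_⟩
      · rw [hy0, show (0 : Int) - 1 = -((1 : Nat) : Int) from by norm_num]
        rw [hgetneg 1 (by omega) hL1]
        rw [show cs.length - 1 + 1 = cs.length from by omega]
      · rw [hy0, show (0 : Int) = ((0 : Nat) : Int) from rfl, PySem.List.slice_to_natCast]
      · rw [List.count_eq_zero.mpr (fun hmem => hone (List.mem_of_mem_take hmem)),
          List.count_eq_zero.mpr (fun hmem => hone (List.mem_of_mem_take hmem))]
    · by_cases hyp : 1 ≤ y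
      · obtain ⟨Y, hYi⟩ : ∃ Y : Nat, (Y : Int) = y := ⟨y.toNat, Int.toNat_of_nonneg (by omega)⟩
        have hYlen : Y ≤ cs.length := by omega
        have hY1 : 1 ≤ Y := by omega
        refine ⟨Y, Y, ?_, ?_, rfl⟩
        · rw [show y - 1 = ((Y - 1 : Nat) : Int) from by
            rw [Nat.cast_sub hY1, Nat.cast_one, hYi]]
          rw [hget (Y - 1) (by omega), show Y - 1 + 1 = Y from by omega]
        · rw [show y = ((Y : Nat) : Int) from hYi.symm, PySem.List.slice_to_natCast]
      · have hyneg : y ≤ -1 := by omega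
        obtain ⟨m, hm⟩ : ∃ m : Nat, (m : Int) = -y := ⟨(-y).toNat, Int.toNat_of_nonneg (by omega)⟩
        have hmpos : 0 < m := by omega
        have hmle : m ≤ cs.length := by omega
        refine ⟨cs.length - m, cs.length - m, ?_, ?_, rfl⟩
        · obtain ⟨m1, hm1⟩ : ∃ m1 : Nat, (m1 : Int) = 1 - y :=
            ⟨(1 - y).toNat, Int.toNat_of_nonneg (by omega)⟩
          have hm1pos : 0 < m1 := by omega
          have hm1le : m1 ≤ cs.length := by omega
          rw [show y - 1 = -((m1 : Int)) from by omega]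
          rw [hgetneg m1 hm1pos hm1le]
          rw [show cs.length - m1 + 1 = cs.length - m from by omega]
        · rw [show y = -((m : Int)) from by omega]
          exact PySem.List.slice_to_neg_natCast _ _ hmpos
  obtain ⟨X, hPX, hX1, hSX⟩ :
      ∃ X : Nat,
        (x ≠ 1 → PySem.List.pyGetD ((List.range cs.length).map
          (fun i => ((cs.take (i + 1)).count '1' : Int))) (x - 2) 0
          = ((cs.take X).count '1' : Int)) ∧
        (x = 1 → X = 0) ∧
        PySem.List.slice cs none (some (x - 1)) = cs.take X := by
    by_cases hxp : 1 ≤ x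
    · obtain ⟨X, hXi⟩ : ∃ X : Nat, (X : Int) = x - 1 :=
        ⟨(x - 1).toNat, Int.toNat_of_nonneg (by omega)⟩
      refine ⟨X, ?_, by intro h1; omega, ?_⟩
      · intro hx
        have hX1 : 1 ≤ X := by omega
        have hXlen : X ≤ cs.length := by rcases hqx with h | h <;> omega
        rw [show x - 2 = ((X - 1 : Nat) : Int) from by
          rw [Nat.cast_sub hX1, Nat.cast_one, hXi]; ring]
        rw [hget (X - 1) (by omega), show X - 1 + 1 = X from by omega]
      · rw [show x - 1 = ((X : Nat) : Int) from hXi.symm, PySem.List.slice_to_natCast]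
    · obtain ⟨k, hk⟩ : ∃ k : Nat, (k : Int) = 1 - x :=
        ⟨(1 - x).toNat, Int.toNat_of_nonneg (by omega)⟩
      have hkpos : 0 < k := by omega
      refine ⟨cs.length - k, ?_, by intro h1; omega, ?_⟩
      · intro _
        obtain ⟨k2, hk2⟩ : ∃ k2 : Nat, (k2 : Int) = 2 - x :=
          ⟨(2 - x).toNat, Int.toNat_of_nonneg (by omega)⟩
        have hk2pos : 0 < k2 := by omega
        have hk2le : k2 ≤ cs.length := by rcases hqx with h | h <;> omega
        rw [show x - 2 = -((k2 : Int)) from by omega]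
        rw [hgetneg k2 hk2pos hk2le]
        rw [show cs.length - k2 + 1 = cs.length - k from by omega]
      · rw [show x - 1 = -((k : Int)) from by omega]
        exact PySem.List.slice_to_neg_natCast _ _ hkpos
  -- A's total1 and B's ones are the same prefix-count difference
  have hones : (PySem.Str.count (PySem.Str.slice s none (some y)) "1" : Int) -
      (PySem.Str.count (PySem.Str.slice s none (some (x - 1))) "1" : Int)
      = ((cs.take Ya).count '1' : Int) - ((cs.take X).count '1' : Int) := by
    rw [strPrefixCount, strPrefixCount, ← hcs, hSY, hSX, hYcnt]
  have htotal1 :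
      (if x = 1 then PySem.List.pyGetD ((List.range cs.length).map
          (fun i => ((cs.take (i + 1)).count '1' : Int))) (y - 1) 0
        else PySem.List.pyGetD ((List.range cs.length).map
          (fun i => ((cs.take (i + 1)).count '1' : Int))) (y - 1) 0 -
          PySem.List.pyGetD ((List.range cs.length).map
          (fun i => ((cs.take (i + 1)).count '1' : Int))) (x - 2) 0)
      = ((cs.take Ya).count '1' : Int) - ((cs.take X).count '1' : Int) := by
    by_cases hx : x = 1
    · rw [if_pos hx, hPY, hX1 hx]
      simp
    · rw [if_neg hx, hPY, hPX hx]
  rw [htotal1, hones]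
  exact mod_chain _ _

-- ===== VERDICT (by name: the statements are the Claim_ definitions above) =====
theorem solve_spec : Claim_unchanged_solve := by
  intro n q s queries _ hpre hnd
  refine solve_spec_aux n q s queries hpre ?_
  intro p hp hp2 hmem
  exact hnd ⟨p, hp, hp2, hmem⟩

set_option maxRecDepth 4000 in
theorem solve_changed : Claim_changed_solve := by
  unfold Claim_changed_solve
  decide
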